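-- pv_equiv track=rewrite | github.com/Yillasov/Oblivion | src/core/hardware/health_monitor.py | _calculate_overall_health_from_entries
-- ===== SOURCE A (Python) =====
-- HEALTH_CRITICAL = "CRITICAL"
--
-- HEALTH_WARNING = "WARNING"
--
-- HEALTH_NORMAL = "NORMAL"
--
-- HEALTH_UNKNOWN = "UNKNOWN"
--
-- def _calculate_overall_health_from_entries(entries) -> str:
--     """
--     Calculate overall health from entries.
--
--     Args:
--         entries: Health history entries
--
--     Returns:
--         str: Overall health status
--     """
--     overall_health = [entry.get("overall_health", HEALTH_UNKNOWN) for entry in entries]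
--
--     if HEALTH_CRITICAL in overall_health:
--         return HEALTH_CRITICAL
--     elif HEALTH_WARNING in overall_health:
--         return HEALTH_WARNING
--     elif all(health == HEALTH_NORMAL for health in overall_health):
--         return HEALTH_NORMAL
--     else:
--         return HEALTH_UNKNOWN
-- ===== SOURCE B (Python) =====
-- HEALTH_CRITICAL = "CRITICAL"
-- HEALTH_WARNING = "WARNING"
-- HEALTH_NORMAL = "NORMAL"
-- HEALTH_UNKNOWN = "UNKNOWN"
--
-- _SEVERITY = {HEALTH_NORMAL: 0, HEALTH_WARNING: 2, HEALTH_CRITICAL: 3}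
-- _BY_SEVERITY = (HEALTH_NORMAL, HEALTH_UNKNOWN, HEALTH_WARNING, HEALTH_CRITICAL)
--
-- def _calculate_overall_health_from_entries(entries) -> str:
--     # Reduce to the maximum numeric severity; any unrecognised status ranks as UNKNOWN (1).
--     worst = 0
--     for entry in entries:
--         worst = max(worst, _SEVERITY.get(entry.get("overall_health", HEALTH_UNKNOWN), 1))
--     return _BY_SEVERITY[worst]
-- ===== Notes on version B (the rewrite author's own statement) =====
-- stated objective: alternative
-- what changed: Replaces A's list-building plus priority-ordered membership/all scans with a numeric severity lattice: each status is mapped to a rank (NORMAL=0, unknown/other=1, WARNING=2, CRITICAL=3), the ranks are reduced with max in one pass, and the result is read from a rank-to-status table.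
import Mathlib
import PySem

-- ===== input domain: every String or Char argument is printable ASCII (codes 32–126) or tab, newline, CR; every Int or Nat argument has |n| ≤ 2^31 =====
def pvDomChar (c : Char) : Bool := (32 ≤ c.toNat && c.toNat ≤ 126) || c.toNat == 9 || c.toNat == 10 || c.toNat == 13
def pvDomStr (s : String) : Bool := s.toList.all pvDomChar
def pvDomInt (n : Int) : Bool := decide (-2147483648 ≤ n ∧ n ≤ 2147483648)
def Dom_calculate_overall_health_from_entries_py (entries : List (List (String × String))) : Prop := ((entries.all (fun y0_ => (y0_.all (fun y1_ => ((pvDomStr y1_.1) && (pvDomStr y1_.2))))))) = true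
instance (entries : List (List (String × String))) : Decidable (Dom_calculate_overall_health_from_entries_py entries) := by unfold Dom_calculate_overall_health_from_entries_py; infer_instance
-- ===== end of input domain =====

-- ===== PORT A =====
-- B replaces A's status list and priority-ordered scans with a max reduction over numeric severities (objective: alternative).
def calculate_overall_health_from_entries_py (entries : List (List (String × String))) : String :=
  let overall_health := entries.map (fun entry => ((entry.lookup "overall_health").getD "UNKNOWN"))
  if "CRITICAL" ∈ overall_health then "CRITICAL"
  else if "WARNING" ∈ overall_health then "WARNING"
  else if overall_health.all (fun health => health == "NORMAL") then "NORMAL"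
  else "UNKNOWN"

-- ===== PORT B =====
-- _SEVERITY.get(status, 1)
def pvSeverity (status : String) : Nat :=
  (([("NORMAL", 0), ("WARNING", 2), ("CRITICAL", 3)] : List (String × Nat)).lookup status).getD 1

-- the loop `worst = max(worst, …)` followed by `_BY_SEVERITY[worst]`
-- (worst is always ≤ 3, so the tuple index never goes out of range; getD's default is unreachable)
def calculate_overall_health_from_entries_py_alt (entries : List (List (String × String))) : String :=
  let worst := entries.foldl
    (fun worst entry => max worst (pvSeverity ((entry.lookup "overall_health").getD "UNKNOWN"))) 0
  (["NORMAL", "UNKNOWN", "WARNING", "CRITICAL"] : List String).getD worst "UNKNOWN"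

-- ===== PRECONDITION & SPEC =====
def Spec_calculate_overall_health_from_entries_py (entries : List (List (String × String))) (out : String) : Prop := out = calculate_overall_health_from_entries_py_alt entries
instance (entries : List (List (String × String))) (out : String) : Decidable (Spec_calculate_overall_health_from_entries_py entries out) := by unfold Spec_calculate_overall_health_from_entries_py; infer_instance

-- ===== CLAIM (what is proved, stated in full; the proofs are below) =====
def Claim_equal_calculate_overall_health_from_entries_py : Prop := ∀ (entries : List (List (String × String))), Dom_calculate_overall_health_from_entries_py entries → Spec_calculate_overall_health_from_entries_py entries (calculate_overall_health_from_entries_py entries)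

-- ===== LEMMAS AND PROOFS =====
-- the "worst severity" of a status list, phrased the way A decides it
def pvWorst (L : List String) : Nat :=
  if "CRITICAL" ∈ L then 3
  else if "WARNING" ∈ L then 2
  else if L.all (fun h => h == "NORMAL") then 0
  else 1

theorem pvSeverity_eq (s : String) :
    pvSeverity s = (if s = "CRITICAL" then 3 else if s = "WARNING" then 2 else if s = "NORMAL" then 0 else 1) := by
  unfold pvSeverity
  by_cases h1 : s = "CRITICAL" <;> by_cases h2 : s = "WARNING" <;> by_cases h3 : s = "NORMAL" <;>
    simp_all [List.lookup]
  simp [beq_eq_false_iff_ne.mpr h1, beq_eq_false_iff_ne.mpr h2, beq_eq_false_iff_ne.mpr h3]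

theorem pvSeverity_max_pvWorst (s : String) (L : List String) :
    max (pvSeverity s) (pvWorst L) = pvWorst (s :: L) := by
  rw [pvSeverity_eq]
  unfold pvWorst
  simp only [List.mem_cons, List.all_cons]
  by_cases hc : s = "CRITICAL" <;> by_cases hw : s = "WARNING" <;> by_cases hn : s = "NORMAL" <;>
    simp_all <;> split_ifs <;> simp_all

theorem foldl_max_sev (L : List String) :
    ∀ (a : Nat), L.foldl (fun w s => max w (pvSeverity s)) a = max a (pvWorst L) := by
  induction L with
  | nil => intro a; simp [pvWorst]
  | cons s L ih =>
    intro a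
    rw [List.foldl_cons, ih, Nat.max_assoc, pvSeverity_max_pvWorst]

-- ===== VERDICT (by name: the statement is the Claim_ definition above) =====
theorem calculate_overall_health_from_entries_py_spec : Claim_equal_calculate_overall_health_from_entries_py := by
  intro entries _
  unfold Spec_calculate_overall_health_from_entries_py
  unfold calculate_overall_health_from_entries_py calculate_overall_health_from_entries_py_alt
  have hfold : entries.foldl
      (fun worst entry => max worst (pvSeverity ((entry.lookup "overall_health").getD "UNKNOWN"))) 0
      = pvWorst (entries.map (fun entry => ((entry.lookup "overall_health").getD "UNKNOWN"))) := by
    rw [← List.foldl_map]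
    have hm : (entries.map (fun entry => pvSeverity ((entry.lookup "overall_health").getD "UNKNOWN")))
        = (entries.map (fun entry => ((entry.lookup "overall_health").getD "UNKNOWN"))).map pvSeverity := by
      simp [List.map_map]
    rw [hm, List.foldl_map, foldl_max_sev]
    simp
  simp only [hfold]
  set L := entries.map (fun entry => ((entry.lookup "overall_health").getD "UNKNOWN")) with hL
  unfold pvWorst
  split_ifs <;> simp
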